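-- pv_equiv track=rewrite | github.com/Xam-N/Thesis_Project | Graphing.py | rightAndSearch
-- ===== SOURCE A (Python) =====
-- def rightAndSearch(wordTags,stopIndex):
--     tempDict = {}
--     height = 0
--     andCounter = 0
--     skip = False
--     skipQuantity = 0
--     for index,word in enumerate(wordTags[stopIndex+1:]):
--         if skip == True:
--             if word[1] == "lbracket":
--                 skipQuantity = skipQuantity + 1
--                 continue
--             if word[1] == "rbracket" and skipQuantity == 0:
--                 skip = False
--                 continue
--             if word[1] == "rbracket" and skipQuantity != 0:
--                 skipQuantity = skipQuantity - 1
--                 continue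
--             continue
--         if word[1] == "bool":
--             if word[0] == "and":
--                 andCounter = andCounter + 1
--         if word[1] == "lbracket":
--             skip = True
--         if word[1] == "rbracket":
--             tempDict[height] = andCounter
--             height = height + 1
--             andCounter = 0
--     if andCounter != 0:
--         tempDict[height] = andCounter
--
--     return tempDict
-- ===== SOURCE B (Python) =====
-- def andCount(seg):
--     return sum(1 for word, tag in seg if tag == "bool" and word == "and")
--
-- def rightAndSearch(wordTags, stopIndex):
--     segments = []
--     current = []
--     depth = 0
--     for word, tag in wordTags[stopIndex+1:]:
--         if depth > 0:
--             if tag == "lbracket":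
--                 depth += 1
--             elif tag == "rbracket":
--                 depth -= 1
--         elif tag == "lbracket":
--             depth = 1
--         elif tag == "rbracket":
--             segments.append(current)
--             current = []
--         else:
--             current.append((word, tag))
--     counts = [andCount(seg) for seg in segments]
--     result = {}
--     for i, c in enumerate(counts):
--         result[i] = c
--     tail = andCount(current)
--     if tail != 0:
--         result[len(counts)] = tail
--     return result
-- ===== Notes on version B (the rewrite author's own statement) =====
-- stated objective: alternative
-- what changed: Replaces A's skip-flag state machine interleaved with counting and dict insertion by a two-phase decomposition: first split the tokens after stopIndex into top-level segments via a depth counter, then count 'and' booleans per segment and number them.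
import Mathlib
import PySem

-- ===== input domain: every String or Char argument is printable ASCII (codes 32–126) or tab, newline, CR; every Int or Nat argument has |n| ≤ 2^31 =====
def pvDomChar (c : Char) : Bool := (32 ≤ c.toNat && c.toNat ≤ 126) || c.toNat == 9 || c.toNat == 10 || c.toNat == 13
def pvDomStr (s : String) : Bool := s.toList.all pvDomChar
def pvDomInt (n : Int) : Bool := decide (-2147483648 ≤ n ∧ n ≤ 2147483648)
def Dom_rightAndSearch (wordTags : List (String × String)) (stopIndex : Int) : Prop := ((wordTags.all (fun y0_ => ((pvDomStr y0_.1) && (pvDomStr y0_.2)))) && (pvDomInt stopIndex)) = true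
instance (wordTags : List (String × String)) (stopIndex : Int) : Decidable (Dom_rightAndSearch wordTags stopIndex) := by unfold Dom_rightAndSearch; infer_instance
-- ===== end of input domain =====

-- B replaces A's interleaved skip-flag state machine by a two-phase decomposition (split into top-level segments by a depth counter, then count 'and' booleans per segment); same O(n) cost.

-- ===== PORT A =====
-- one iteration of A's for-loop; state = (tempDict, height, andCounter, skip, skipQuantity)
def rightAndSearchStep (st : PySem.Dict Int Int × Int × Int × Bool × Int) (word : String × String) :
    PySem.Dict Int Int × Int × Int × Bool × Int :=
  let (d, height, andC, skip, skipQ) := st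
  if skip = true then
    if word.2 == "lbracket" then (d, height, andC, skip, skipQ + 1)
    else if word.2 == "rbracket" && skipQ == 0 then (d, height, andC, false, skipQ)
    else if word.2 == "rbracket" && skipQ != 0 then (d, height, andC, skip, skipQ - 1)
    else (d, height, andC, skip, skipQ)
  else
    let andC := if word.2 == "bool" && word.1 == "and" then andC + 1 else andC
    let skip := if word.2 == "lbracket" then true else skip
    if word.2 == "rbracket" then (d.insert height andC, height + 1, 0, skip, skipQ)
    else (d, height, andC, skip, skipQ)

def rightAndSearch (wordTags : List (String × String)) (stopIndex : Int) : List (Int × Int) :=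
  let st := (PySem.List.slice wordTags (some (stopIndex + 1)) none).foldl rightAndSearchStep
              (PySem.Dict.empty, 0, 0, false, 0)
  let d := if st.2.2.1 ≠ 0 then st.1.insert st.2.1 st.2.2.1 else st.1
  d.items

-- ===== PORT B =====
def andCountB (seg : List (String × String)) : Int :=
  (seg.countP (fun p => p.2 == "bool" && p.1 == "and") : Int)

def segStep (st : List (List (String × String)) × List (String × String) × Int) (w : String × String) :
    List (List (String × String)) × List (String × String) × Int :=
  let (segs, cur, depth) := st
  if 0 < depth then
    if w.2 == "lbracket" then (segs, cur, depth + 1)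
    else if w.2 == "rbracket" then (segs, cur, depth - 1)
    else (segs, cur, depth)
  else if w.2 == "lbracket" then (segs, cur, 1)
  else if w.2 == "rbracket" then (segs ++ [cur], [], 0)
  else (segs, cur ++ [w], 0)

def rightAndSearch_alt (wordTags : List (String × String)) (stopIndex : Int) : List (Int × Int) :=
  let st := (PySem.List.slice wordTags (some (stopIndex + 1)) none).foldl segStep ([], [], 0)
  let counts := st.1.map andCountB
  let result := (PySem.List.enumerate counts).foldl
      (fun (d : PySem.Dict Int Int) p => d.insert p.1 p.2) PySem.Dict.empty
  let tail := andCountB st.2.1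
  let result := if tail ≠ 0 then result.insert (counts.length : Int) tail else result
  result.items


-- ===== PRECONDITION & SPEC =====
def Spec_rightAndSearch (wordTags : List (String × String)) (stopIndex : Int) (out : List (Int × Int)) : Prop := out = rightAndSearch_alt wordTags stopIndex
instance (wordTags : List (String × String)) (stopIndex : Int) (out : List (Int × Int)) : Decidable (Spec_rightAndSearch wordTags stopIndex out) := by unfold Spec_rightAndSearch; infer_instance

-- ===== CLAIM (what is proved, stated in full; the proofs are below) =====
def Claim_equal_rightAndSearch : Prop := ∀ (wordTags : List (String × String)) (stopIndex : Int), Dom_rightAndSearch wordTags stopIndex → Spec_rightAndSearch wordTags stopIndex (rightAndSearch wordTags stopIndex)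

-- ===== LEMMAS AND PROOFS =====
-- fresh-key insert: if items are an enumerate from 0 of length-n list, key n is fresh
theorem contains_of_enum (d : PySem.Dict Int Int) (xs : List Int)
    (h : d.items = PySem.List.enumerate xs 0) : d.contains (xs.length : Int) = false := by
  rw [← Bool.not_eq_true]
  intro hc
  rw [PySem.Dict.contains_iff_mem_keys] at hc
  have : d.keys = (PySem.List.enumerate xs 0).map (·.1) := by
    simp only [PySem.Dict.keys, h]
  rw [this, PySem.List.map_fst_enumerate] at hc
  rw [PySem.List.mem_pyRange_one] at hc
  omega

theorem fold_rel (l : List (String × String)) :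
    ∀ (segs : List (List (String × String))) (cur : List (String × String))
      (d : PySem.Dict Int Int) (depth : Int), 0 ≤ depth →
    d.items = PySem.List.enumerate (segs.map andCountB) 0 →
    (let stB := l.foldl segStep (segs, cur, depth)
     let stA := l.foldl rightAndSearchStep
        (d, (segs.length : Int), andCountB cur, decide (0 < depth), if 0 < depth then depth - 1 else 0)
     stA.1.items = PySem.List.enumerate (stB.1.map andCountB) 0 ∧
     stA.2.1 = (stB.1.length : Int) ∧
     stA.2.2.1 = andCountB stB.2.1 ∧
     stA.2.2.2.1 = decide (0 < stB.2.2) ∧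
     stA.2.2.2.2 = (if 0 < stB.2.2 then stB.2.2 - 1 else 0) ∧
     0 ≤ stB.2.2) := by
  induction l with
  | nil => intro segs cur d depth hd hi; exact ⟨hi, rfl, rfl, rfl, rfl, hd⟩
  | cons w t ih =>
    intro segs cur d depth hd hi
    simp only [List.foldl_cons]
    by_cases hpos : 0 < depth
    · -- skip mode
      by_cases hl : w.2 = "lbracket"
      · have hstep : segStep (segs, cur, depth) w = (segs, cur, depth + 1) := by
          simp [segStep, hpos, hl]
        have hstepA : rightAndSearchStep (d, (segs.length : Int), andCountB cur, decide (0 < depth), if 0 < depth then depth - 1 else 0) w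
            = (d, (segs.length : Int), andCountB cur, true, depth) := by
          simp [rightAndSearchStep, hpos, hl]
        simp only [hstep, hstepA]
        have := ih segs cur d (depth + 1) (by omega) hi
        simpa [show (0:Int) < depth + 1 by omega, show decide ((0:Int) < depth + 1) = true by simp; omega] using this
      · by_cases hr : w.2 = "rbracket"
        · by_cases h1 : depth = 1
          · have hstep : segStep (segs, cur, depth) w = (segs, cur, 0) := by
              simp [segStep, hpos, hl, hr, h1]
            have hstepA : rightAndSearchStep (d, (segs.length : Int), andCountB cur, decide (0 < depth), if 0 < depth then depth - 1 else 0) w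
                = (d, (segs.length : Int), andCountB cur, false, 0) := by
              simp [rightAndSearchStep, hpos, hl, hr, h1]
            simp only [hstep, hstepA]
            have := ih segs cur d 0 (by omega) hi
            simpa using this
          · have hstep : segStep (segs, cur, depth) w = (segs, cur, depth - 1) := by
              simp [segStep, hpos, hl, hr]
            have hstepA : rightAndSearchStep (d, (segs.length : Int), andCountB cur, decide (0 < depth), if 0 < depth then depth - 1 else 0) w
                = (d, (segs.length : Int), andCountB cur, true, depth - 2) := by
              have hq : (depth - 1 : Int) ≠ 0 := by omega
              simp [rightAndSearchStep, hpos, hl, hr, hq]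
              ring
            simp only [hstep, hstepA]
            have := ih segs cur d (depth - 1) (by omega) hi
            simpa [show (1:Int) < depth by omega, show (depth - 1 - 1 : Int) = depth - 2 by ring] using this
        · have hstep : segStep (segs, cur, depth) w = (segs, cur, depth) := by
            simp [segStep, hpos, hl, hr]
          have hstepA : rightAndSearchStep (d, (segs.length : Int), andCountB cur, decide (0 < depth), if 0 < depth then depth - 1 else 0) w
              = (d, (segs.length : Int), andCountB cur, true, depth - 1) := by
            simp [rightAndSearchStep, hpos, hl, hr]
          simp only [hstep, hstepA]
          have := ih segs cur d depth hd hi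
          simpa [hpos] using this
    · -- top level, depth = 0
      have hz : depth = 0 := by omega
      subst hz
      by_cases hl : w.2 = "lbracket"
      · have hstep : segStep (segs, cur, 0) w = (segs, cur, 1) := by
          simp [segStep, hl]
        have hstepA : rightAndSearchStep (d, (segs.length : Int), andCountB cur, decide ((0:Int) < 0), if (0:Int) < 0 then (0:Int) - 1 else 0) w
            = (d, (segs.length : Int), andCountB cur, true, 0) := by
          simp [rightAndSearchStep, hl]
        simp only [hstep, hstepA]
        have := ih segs cur d 1 (by omega) hi
        simpa using this
      · by_cases hr : w.2 = "rbracket"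
        · have hstep : segStep (segs, cur, 0) w = (segs ++ [cur], [], 0) := by
            simp [segStep, hl, hr]
          have hstepA : rightAndSearchStep (d, (segs.length : Int), andCountB cur, decide ((0:Int) < 0), if (0:Int) < 0 then (0:Int) - 1 else 0) w
              = (d.insert (segs.length : Int) (andCountB cur), (segs.length : Int) + 1, 0, false, 0) := by
            simp [rightAndSearchStep, hl, hr]
          simp only [hstep, hstepA]
          have hfresh : d.contains ((segs.map andCountB).length : Int) = false :=
            contains_of_enum d (segs.map andCountB) hi
          have hi' : (d.insert (segs.length : Int) (andCountB cur)).items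
              = PySem.List.enumerate ((segs ++ [cur]).map andCountB) 0 := by
            rw [PySem.Dict.items_insert_of_not_contains d (andCountB cur) (by simpa using hfresh)]
            rw [hi]
            simp [PySem.List.enumerate_append, PySem.List.enumerate_cons, PySem.List.enumerate_nil]
          have := ih (segs ++ [cur]) [] (d.insert (segs.length : Int) (andCountB cur)) 0 (by omega) hi'
          simpa [andCountB, Nat.cast_add] using this
        · -- ordinary token: appended to cur
          have hstep : segStep (segs, cur, 0) w = (segs, cur ++ [w], 0) := by
            simp [segStep, hl, hr]
          have hstepA : rightAndSearchStep (d, (segs.length : Int), andCountB cur, decide ((0:Int) < 0), if (0:Int) < 0 then (0:Int) - 1 else 0) w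
              = (d, (segs.length : Int), andCountB (cur ++ [w]), false, 0) := by
            simp only [rightAndSearchStep, hl, hr, andCountB, List.countP_append, List.countP_cons,
              List.countP_nil]
            by_cases hb : (w.2 == "bool" && w.1 == "and") = true <;>
              simp [hb, hl, hr]
          simp only [hstep, hstepA]
          have := ih segs (cur ++ [w]) d 0 (by omega) hi
          simpa using this


-- ===== VERDICT (by name: the statement is the Claim_ definition above) =====
theorem rightAndSearch_spec : Claim_equal_rightAndSearch := by
  intro wordTags stopIndex _
  show rightAndSearch wordTags stopIndex = rightAndSearch_alt wordTags stopIndex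
  unfold rightAndSearch rightAndSearch_alt
  obtain ⟨h1, h2, h3, -, -, -⟩ :=
    fold_rel (PySem.List.slice wordTags (some (stopIndex + 1)) none) [] [] PySem.Dict.empty 0
      (le_refl 0) rfl
  norm_num [show andCountB [] = 0 from rfl] at h1 h2 h3
  set stA := (PySem.List.slice wordTags (some (stopIndex + 1)) none).foldl rightAndSearchStep
      (PySem.Dict.empty, 0, 0, false, 0) with hA
  set stB := (PySem.List.slice wordTags (some (stopIndex + 1)) none).foldl segStep ([], [], 0) with hB
  -- B's dict-comprehension loop: items = enumerate counts
  have hBitems : ((PySem.List.enumerate (stB.1.map andCountB)).foldl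
      (fun (d : PySem.Dict Int Int) p => d.insert p.1 p.2) PySem.Dict.empty).items
      = PySem.List.enumerate (stB.1.map andCountB) 0 := by
    rw [show (fun (d : PySem.Dict Int Int) (p : Int × Int) => d.insert p.1 p.2)
        = (fun (d : PySem.Dict Int Int) (p : Int × Int) => d.insert ((fun q : Int × Int => q.1) p) ((fun q : Int × Int => q.2) p)) from rfl,
      PySem.Dict.items_foldl_insert_fresh _ _ _ _
        (by intro a _; exact PySem.Dict.contains_empty _)
        (by rw [PySem.List.map_fst_enumerate]; exact PySem.List.nodup_pyRange_one _ _)]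
    simp [PySem.Dict.empty]
  by_cases hc : stA.2.2.1 = 0
  · have htail : andCountB stB.2.1 = 0 := by rw [← h3]; exact hc
    simp only [hc, htail, ne_eq, not_true_eq_false, if_neg, ite_false, not_not]
    rw [h1, hBitems]
  · have htail : andCountB stB.2.1 ≠ 0 := by rw [← h3]; exact hc
    simp only [hc, htail, ne_eq, not_false_eq_true, if_pos, ite_true]
    have hfA : stA.1.contains ((stB.1.map andCountB).length : Int) = false :=
      contains_of_enum stA.1 (stB.1.map andCountB) h1
    have hfB : (((PySem.List.enumerate (stB.1.map andCountB)).foldl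
        (fun (d : PySem.Dict Int Int) p => d.insert p.1 p.2) PySem.Dict.empty)).contains
        ((stB.1.map andCountB).length : Int) = false :=
      contains_of_enum _ (stB.1.map andCountB) hBitems
    have h2' : stA.2.1 = ((stB.1.map andCountB).length : Int) := by simpa using h2
    rw [h2', h3]
    rw [PySem.Dict.items_insert_of_not_contains _ _ hfA,
        PySem.Dict.items_insert_of_not_contains _ _ hfB, h1, hBitems]
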